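-- pv_equiv track=rewrite | github.com/CarlDegio/math_modeling_test | GA解VRP(有约束多TSP).py | constraint_capacity
-- ===== SOURCE A (Python) =====
-- max_capacity = 5#一条回路最多点数
--
-- def constraint_capacity(routine):#路径合法性检验,为正不合法
--     capacity = 0
--     c = 0
--     for i in routine:
--         if i != 0:
--             c += 1
--         else:
--             capacity = max(capacity, c + 1)
--             c = 0
--     capacity = max(capacity, c + 1)
--     return capacity - max_capacity
-- ===== SOURCE B (Python) =====
-- max_capacity = 5  # max points per loop
--
--
-- def constraint_capacity(routine):
--     # Gap-based: positions of zeros (with sentinels) determine the maximal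
--     # non-zero segment length as the largest gap between consecutive zeros.
--     zpos = [-1] + [i for i, v in enumerate(routine) if v == 0] + [len(routine)]
--     longest = max(b - a - 1 for a, b in zip(zpos, zpos[1:]))
--     return longest + 1 - max_capacity
-- ===== Notes on version B (the rewrite author's own statement) =====
-- stated objective: alternative
-- what changed: B replaces A's single pass with a running counter and inline max by computing the zero positions (with sentinels -1 and len) and taking the maximum gap between consecutive zeros.
import Mathlib
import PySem

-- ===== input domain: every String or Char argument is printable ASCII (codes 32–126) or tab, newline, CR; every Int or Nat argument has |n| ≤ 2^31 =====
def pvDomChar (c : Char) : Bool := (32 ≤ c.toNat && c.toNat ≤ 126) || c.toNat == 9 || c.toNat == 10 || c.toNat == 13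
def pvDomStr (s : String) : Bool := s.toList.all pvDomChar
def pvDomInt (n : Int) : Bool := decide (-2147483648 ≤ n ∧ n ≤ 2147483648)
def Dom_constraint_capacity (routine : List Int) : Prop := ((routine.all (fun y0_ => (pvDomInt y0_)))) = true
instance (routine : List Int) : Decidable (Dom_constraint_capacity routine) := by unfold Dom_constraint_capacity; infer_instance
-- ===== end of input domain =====

-- B replaces A's running-counter/running-max loop by building the zero positions
-- (with sentinels) and taking the largest gap between consecutive zeros (idiomatic
-- decomposition; same O(n) cost).

-- ===== PORT A =====
-- A: one pass keeping (capacity, c); each zero folds c+1 into capacity, final max after the loop.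
def constraint_capacity (routine : List Int) : Int :=
  let st := routine.foldl
    (fun (s : Int × Int) i => if i ≠ 0 then (s.1, s.2 + 1) else (max s.1 (s.2 + 1), 0))
    (0, 0)
  max st.1 (st.2 + 1) - 5

-- ===== PORT B =====
-- B: zero positions with sentinels -1 and len; longest = max of consecutive gaps minus 1.
def constraint_capacity_alt (routine : List Int) : Int :=
  let zpos : List Int :=
    -1 :: ((PySem.List.enumerate routine).filterMap
            (fun p => if p.2 = 0 then some p.1 else none)) ++ [(routine.length : Int)]
  let gaps := (zpos.zip (PySem.List.slice zpos (some 1) none)).map (fun p => p.2 - p.1 - 1)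
  -- max(generator): zpos has ≥ 2 elements, so gaps is never empty and Python's max returns
  ((PySem.List.max? gaps (fun x => x)).getD 0) + 1 - 5

-- ===== PRECONDITION & SPEC =====
def Spec_constraint_capacity (routine : List Int) (out : Int) : Prop := out = constraint_capacity_alt routine
instance (routine : List Int) (out : Int) : Decidable (Spec_constraint_capacity routine out) := by unfold Spec_constraint_capacity; infer_instance

-- ===== CLAIM (what is proved, stated in full; the proofs are below) =====
def Claim_equal_constraint_capacity : Prop := ∀ (routine : List Int), Dom_constraint_capacity routine → Spec_constraint_capacity routine (constraint_capacity routine)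

-- ===== LEMMAS AND PROOFS =====

-- lengths of the runs delimited by zeros (one entry per zero, plus the trailing run), starting mid-run with count c
def runsAux : List Int → Int → List Int
  | [], c => [c]
  | x :: r, c => if x = 0 then c :: runsAux r 0 else runsAux r (c + 1)

-- indices of the zeros of l, counting from k
def zeroIdx : List Int → Int → List Int
  | [], _ => []
  | x :: r, k => if x = 0 then k :: zeroIdx r (k + 1) else zeroIdx r (k + 1)

lemma filterMap_enumerate_eq_zeroIdx (l : List Int) (k : Int) :
    (PySem.List.enumerate l k).filterMap (fun p => if p.2 = 0 then some p.1 else none)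
      = zeroIdx l k := by
  induction l generalizing k with
  | nil => simp [PySem.List.enumerate, zeroIdx]
  | cons x r ih =>
      rw [PySem.List.enumerate_cons]
      by_cases hx : x = 0 <;> simp [zeroIdx, hx, ih]

lemma loopA_eq_runsAux (l : List Int) (cap c : Int) :
    max (l.foldl (fun (s : Int × Int) i => if i ≠ 0 then (s.1, s.2 + 1) else (max s.1 (s.2 + 1), 0)) (cap, c)).1
        ((l.foldl (fun (s : Int × Int) i => if i ≠ 0 then (s.1, s.2 + 1) else (max s.1 (s.2 + 1), 0)) (cap, c)).2 + 1)
      = (runsAux l c).foldl (fun m v => max m (v + 1)) cap := by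
  induction l generalizing cap c with
  | nil => simp [runsAux]
  | cons x r ih =>
      by_cases hx : x = 0
      · rw [List.foldl_cons, if_neg (show ¬ x ≠ 0 by simp [hx]),
            show runsAux (x :: r) c = c :: runsAux r 0 by simp [runsAux, hx],
            List.foldl_cons]
        exact ih (max cap (c + 1)) 0
      · rw [List.foldl_cons, if_pos hx,
            show runsAux (x :: r) c = runsAux r (c + 1) by simp [runsAux, hx]]
        exact ih cap (c + 1)

lemma gaps_eq_runsAux (l : List Int) (p c : Int) :
    ((( p :: zeroIdx l (p + c + 1) ++ [p + c + 1 + l.length]).zip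
       ((p :: zeroIdx l (p + c + 1) ++ [p + c + 1 + l.length]).tail)).map
        (fun q => q.2 - q.1 - 1))
      = runsAux l c := by
  induction l generalizing p c with
  | nil => simp [zeroIdx, runsAux]; omega
  | cons x r ih =>
      by_cases hx : x = 0
      · simp only [zeroIdx, if_pos hx, List.length_cons]
        have h2 := ih (p + c + 1) 0
        rw [show p + c + 1 + 0 + 1 = p + c + 1 + 1 by ring] at h2
        push_cast
        rw [show p + c + 1 + ((r.length : Int) + 1) = p + c + 1 + 1 + r.length by ring]
        simp only [List.cons_append, List.tail_cons, List.zip_cons_cons, List.map_cons]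
        rw [show p + c + 1 - p - 1 = c by ring,
            show runsAux (x :: r) c = c :: runsAux r 0 by simp [runsAux, hx]]
        simp only [List.cons_append, List.tail_cons] at h2
        rw [h2]
      · simp only [zeroIdx, if_neg hx, List.length_cons]
        push_cast
        rw [show p + c + 1 + ((r.length : Int) + 1) = p + (c + 1) + 1 + r.length by ring,
            show p + c + 1 + 1 = p + (c + 1) + 1 by ring,
            show runsAux (x :: r) c = runsAux r (c + 1) by simp [runsAux, hx]]
        exact ih p (c + 1)

lemma runsAux_nonneg (l : List Int) (c : Int) (hc : 0 ≤ c) :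
    ∀ v ∈ runsAux l c, 0 ≤ v := by
  induction l generalizing c with
  | nil => simpa [runsAux] using hc
  | cons x r ih =>
      by_cases hx : x = 0
      · simp only [runsAux, if_pos hx]
        intro v hv
        rcases List.mem_cons.mp hv with h | h
        · omega
        · exact ih 0 le_rfl v h
      · simp only [runsAux, if_neg hx]
        exact ih (c + 1) (by omega)

lemma foldl_shift (t : List Int) (a : Int) :
    t.foldl (fun m v => max m (v + 1)) (a + 1) = t.foldl max a + 1 := by
  induction t generalizing a with
  | nil => rfl
  | cons v r ih =>
      simp only [List.foldl_cons]
      rw [show max (a + 1) (v + 1) = max a v + 1 by omega]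
      exact ih (max a v)

lemma runsAux_ne_nil (l : List Int) (c : Int) : runsAux l c ≠ [] := by
  induction l generalizing c with
  | nil => simp [runsAux]
  | cons x r ih => by_cases hx : x = 0 <;> simp [runsAux, hx, ih]

lemma runsAux_foldl_eq (l : List Int) :
    (runsAux l 0).foldl (fun m v => max m (v + 1)) 0
      = ((PySem.List.max? (runsAux l 0) (fun x => x)).getD 0) + 1 := by
  obtain ⟨x, t, hxt⟩ := List.exists_cons_of_ne_nil (runsAux_ne_nil l 0)
  have hx0 : 0 ≤ x := runsAux_nonneg l 0 le_rfl x (hxt ▸ List.mem_cons_self ..)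
  rw [hxt, PySem.List.max?_id_cons, Option.getD_some]
  simp only [List.foldl_cons]
  rw [show max (0 : Int) (x + 1) = x + 1 by omega, foldl_shift]

-- ===== VERDICT (by name: the statement is the Claim_ definition above) =====
theorem constraint_capacity_spec : Claim_equal_constraint_capacity := by
  intro routine _
  unfold Spec_constraint_capacity constraint_capacity constraint_capacity_alt
  simp only [PySem.List.slice_from_one, filterMap_enumerate_eq_zeroIdx]
  rw [show zeroIdx routine 0 = zeroIdx routine (-1 + 0 + 1) by norm_num,
      show (routine.length : Int) = -1 + 0 + 1 + routine.length by ring]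
  rw [gaps_eq_runsAux routine (-1) 0, loopA_eq_runsAux, runsAux_foldl_eq]
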